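-- pv_equiv track=rewrite | github.com/alruminum/dcNess | harness/session_state.py | _latest_step_per_role
-- ===== SOURCE A (Python) =====
-- def _latest_step_per_role(steps: list) -> list:
--     """`steps` 의 같은 (agent, mode) 쌍 중 *마지막* entry 만 골라 반환 (#272 W4).
--
--     POLISH/retry 사이클 완료 후 LGTM 으로 해소된 must_fix 가 has_must_fix 에 sticky
--     되는 문제 해결용. 최신 step 만 봄으로써 step #N 이 CHANGES_REQUESTED → step #M
--     이 LGTM 이면 latest = LGTM (must_fix=False) 로 평가.
--
--     입력 순서 (시간 순) 유지 — 같은 키 마지막 발생.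
--     """
--     out: dict = {}
--     for s in steps:
--         if not isinstance(s, dict):
--             continue
--         key = (s.get("agent"), s.get("mode"))
--         out[key] = s
--     return list(out.values())
-- ===== SOURCE B (Python) =====
-- def _latest_step_per_role(steps: list) -> list:
--     """Same result as A: for each (agent, mode) pair keep only the last entry,
--     emitted in first-occurrence order.  Brute-force decomposition: scan forward,
--     and for each pair seen for the first time, search backwards for its last entry."""
--     out = []
--     seen = set()
--     for s in steps:
--         if not isinstance(s, dict):
--             continue
--         key = (s.get("agent"), s.get("mode"))
--         if key in seen:
--             continue
--         seen.add(key)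
--         for t in reversed(steps):
--             if isinstance(t, dict) and (t.get("agent"), t.get("mode")) == key:
--                 out.append(t)
--                 break
--     return out
-- ===== Notes on version B (the rewrite author's own statement) =====
-- stated objective: alternative
-- what changed: Replaces A's single dict-overwrite pass (values of an insertion-ordered dict) by a forward scan with a seen-set that, at each first occurrence of a (agent, mode) key, searches the list backwards for the last entry with that key.
import Mathlib
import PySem

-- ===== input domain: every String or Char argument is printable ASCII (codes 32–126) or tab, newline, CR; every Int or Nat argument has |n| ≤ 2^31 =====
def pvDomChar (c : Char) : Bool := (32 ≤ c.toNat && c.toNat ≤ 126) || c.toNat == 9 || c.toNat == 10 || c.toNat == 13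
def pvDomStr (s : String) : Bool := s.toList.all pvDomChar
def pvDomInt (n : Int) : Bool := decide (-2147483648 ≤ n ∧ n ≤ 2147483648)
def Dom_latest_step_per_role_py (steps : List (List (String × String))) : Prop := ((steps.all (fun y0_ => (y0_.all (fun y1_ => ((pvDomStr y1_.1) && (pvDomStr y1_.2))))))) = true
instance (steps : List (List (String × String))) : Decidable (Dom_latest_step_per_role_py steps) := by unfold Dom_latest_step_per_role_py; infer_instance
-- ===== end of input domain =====

-- B replaces A's dict-overwrite pass by a seen-set forward scan with a backward search
-- per first-seen key (alternative decomposition, same exact result).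


-- key = (s.get("agent"), s.get("mode")) — shared by both ports
def stepKey (s : List (String × String)) : Option String × Option String :=
  (PySem.Dict.get? (PySem.Dict.mk s) "agent", PySem.Dict.get? (PySem.Dict.mk s) "mode")

-- ===== PORT A =====
-- out: dict = {}; for s in steps: out[(s.get("agent"), s.get("mode"))] = s; return list(out.values())
-- (the isinstance(s, dict) guard is vacuous under the type convention: every element IS a dict)
def latest_step_per_role_py (steps : List (List (String × String))) : List (List (String × String)) :=
  (steps.foldl
    (fun (out : PySem.Dict (Option String × Option String) (List (String × String))) s =>
      out.insert (stepKey s) s)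
    PySem.Dict.empty).values

-- ===== PORT B =====
-- seen = set(); out = []; for s in steps: if key new, mark seen and append the last
-- t in steps with that key (backward scan with break → find? on the reversed list)
def latest_step_per_role_py_alt (steps : List (List (String × String))) : List (List (String × String)) :=
  (steps.foldl
    (fun (acc : PySem.Set (Option String × Option String) × List (List (String × String))) s =>
      let key := stepKey s
      if PySem.Set.contains acc.1 key then acc
      else (PySem.Set.add acc.1 key,
            acc.2 ++ (steps.reverse.find? (fun t => stepKey t == key)).toList))
    (PySem.Set.empty, [])).2

-- ===== PRECONDITION & SPEC =====
def Spec_latest_step_per_role_py (steps : List (List (String × String))) (out : List (List (String × String))) : Prop := out = latest_step_per_role_py_alt steps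
instance (steps : List (List (String × String))) (out : List (List (String × String))) : Decidable (Spec_latest_step_per_role_py steps out) := by unfold Spec_latest_step_per_role_py; infer_instance

-- ===== CLAIM (what is proved, stated in full; the proofs are below) =====
def Claim_equal_latest_step_per_role_py : Prop := ∀ (steps : List (List (String × String))), Dom_latest_step_per_role_py steps → Spec_latest_step_per_role_py steps (latest_step_per_role_py steps)

-- ===== LEMMAS AND PROOFS =====

-- the keys of `ks` not yet in `seen`, first occurrences, in order
def pvNewKeys (seen : PySem.Set (Option String × Option String)) :
    List (Option String × Option String) → List (Option String × Option String)
  | [] => []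
  | k :: ks =>
    if PySem.Set.contains seen k then pvNewKeys seen ks
    else k :: pvNewKeys (PySem.Set.add seen k) ks

theorem set_update_eq_append_newKeys (ks : List (Option String × Option String)) :
    ∀ seen, PySem.Set.update seen ks = seen ++ pvNewKeys seen ks := by
  induction ks with
  | nil => intro seen; simp [PySem.Set.update, pvNewKeys]
  | cons k ks ih =>
    intro seen
    by_cases h : k ∈ seen
    · have hb : PySem.Set.contains seen k = true := by simpa [PySem.Set.contains_iff] using h
      have hadd : PySem.Set.add seen k = seen := by simp [PySem.Set.add, h]
      have := ih seen
      simp only [PySem.Set.update, List.foldl_cons, pvNewKeys, hb] at *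
      simpa [hadd] using this
    · have hb : PySem.Set.contains seen k = false := by simpa [PySem.Set.contains_iff] using h
      have hadd : PySem.Set.add seen k = seen ++ [k] := by simp [PySem.Set.add, h]
      have := ih (PySem.Set.add seen k)
      simp only [PySem.Set.update, List.foldl_cons, pvNewKeys, hb, Bool.false_eq_true] at *
      simpa [hadd] using this

theorem mem_of_mem_newKeys {k : Option String × Option String}
    (ks : List (Option String × Option String)) :
    ∀ seen, k ∈ pvNewKeys seen ks → k ∈ ks := by
  induction ks with
  | nil => intro seen h; simp [pvNewKeys] at h
  | cons k' ks ih =>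
    intro seen h
    by_cases hc : k' ∈ seen
    · have hb : PySem.Set.contains seen k' = true := by simpa [PySem.Set.contains_iff] using hc
      simp only [pvNewKeys, hb, if_true] at h
      exact List.mem_cons_of_mem _ (ih _ h)
    · have hb : PySem.Set.contains seen k' = false := by simpa [PySem.Set.contains_iff] using hc
      simp only [pvNewKeys, hb, Bool.false_eq_true, if_false, List.mem_cons] at h
      rcases h with h | h
      · simp [h]
      · exact List.mem_cons_of_mem _ (ih _ h)

-- value of A's accumulated dict at a key: the LAST step of `l` with that key, else the old value
theorem getD_foldl_insert_stepKey (l : List (List (String × String))) :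
    ∀ (d : PySem.Dict (Option String × Option String) (List (String × String)))
      (k : Option String × Option String),
    (l.foldl (fun d s => d.insert (stepKey s) s) d).getD k [] =
      match l.reverse.find? (fun t => stepKey t == k) with
      | some t => t
      | none => d.getD k [] := by
  induction l with
  | nil => intro d k; rfl
  | cons s l ih =>
    intro d k
    simp only [List.foldl_cons, List.reverse_cons, List.find?_append]
    rw [ih]
    cases hf : l.reverse.find? (fun t => stepKey t == k) with
    | some t => simp
    | none =>
      by_cases hk : stepKey s = k
      · simp [hk, List.find?]
      · have hb : (stepKey s == k) = false := by simp [hk]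
        simp [hb, List.find?, PySem.Dict.getD_insert, Ne.symm hk]

-- A returns, for each first-occurring key, the last step with that key
theorem portA_char (steps : List (List (String × String))) :
    latest_step_per_role_py steps =
      (pvNewKeys PySem.Set.empty (steps.map stepKey)).map
        (fun k => ((steps.reverse.find? (fun t => stepKey t == k)).getD [])) := by
  unfold latest_step_per_role_py
  have hnd : (steps.foldl (fun d s => d.insert (stepKey s) s) PySem.Dict.empty).keys.Nodup :=
    PySem.Dict.nodup_keys_foldl_insert_key steps stepKey (fun _ s => s) PySem.Dict.empty
      PySem.Dict.nodup_keys_empty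
  have hkeys : (steps.foldl (fun d s => d.insert (stepKey s) s) PySem.Dict.empty).keys
      = pvNewKeys PySem.Set.empty (steps.map stepKey) := by
    rw [PySem.Dict.keys_foldl_insert_key steps stepKey (fun _ s => s) PySem.Dict.empty]
    have := set_update_eq_append_newKeys (steps.map stepKey) PySem.Set.empty
    simpa [PySem.Dict.keys_empty, PySem.Set.empty] using this
  rw [PySem.Dict.values_eq_map_keys _ hnd [], hkeys]
  refine List.map_congr_left (fun k hk => ?_)
  rw [getD_foldl_insert_stepKey]
  cases hf : steps.reverse.find? (fun t => stepKey t == k) with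
  | some t => simp
  | none => simp [PySem.Dict.getD_empty]

-- B's loop, generalized over its starting state
theorem portB_gen (all : List (List (String × String))) (l : List (List (String × String))) :
    ∀ (seen : PySem.Set (Option String × Option String)) (out : List (List (String × String))),
    (l.foldl
      (fun (acc : PySem.Set (Option String × Option String) × List (List (String × String))) s =>
        let key := stepKey s
        if PySem.Set.contains acc.1 key then acc
        else (PySem.Set.add acc.1 key,
              acc.2 ++ (all.reverse.find? (fun t => stepKey t == key)).toList))
      (seen, out)).2
    = out ++ (pvNewKeys seen (l.map stepKey)).flatMap
        (fun k => (all.reverse.find? (fun t => stepKey t == k)).toList) := by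
  induction l with
  | nil => intro seen out; simp [pvNewKeys]
  | cons s l ih =>
    intro seen out
    by_cases hc : stepKey s ∈ seen
    · have hcb : PySem.Set.contains seen (stepKey s) = true := by
        simpa [PySem.Set.contains_iff] using hc
      simp only [List.foldl_cons, hcb, if_pos]
      simpa [pvNewKeys, hc] using ih seen out
    · have hcb : PySem.Set.contains seen (stepKey s) = false := by
        simpa [PySem.Set.contains_iff] using hc
      simp only [List.foldl_cons, hcb, if_neg, Bool.false_eq_true, not_false_iff]
      rw [ih]
      simp [pvNewKeys, hc, List.append_assoc]

-- on keys that do occur, the backward search succeeds, so flatMap collapses to map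
theorem flatMap_toList_eq_map (steps : List (List (String × String))) :
    ∀ (ks : List (Option String × Option String)),
    (∀ k ∈ ks, ∃ s ∈ steps, stepKey s = k) →
    ks.flatMap (fun k => (steps.reverse.find? (fun t => stepKey t == k)).toList)
      = ks.map (fun k => ((steps.reverse.find? (fun t => stepKey t == k)).getD [])) := by
  intro ks
  induction ks with
  | nil => intro _; simp
  | cons k ks ih =>
    intro h
    obtain ⟨s, hs, hks⟩ := h k (List.mem_cons_self)
    have hsome : (steps.reverse.find? (fun t => stepKey t == k)).isSome := by
      rw [List.find?_isSome]
      exact ⟨s, List.mem_reverse.mpr hs, by simp [hks]⟩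
    obtain ⟨t, ht⟩ := Option.isSome_iff_exists.mp hsome
    simp only [List.flatMap_cons, List.map_cons, ht, Option.toList_some, Option.getD_some]
    rw [ih (fun k hk => h k (List.mem_cons_of_mem _ hk))]
    rfl

-- ===== VERDICT (by name: the statement is the Claim_ definition above) =====
theorem latest_step_per_role_py_spec : Claim_equal_latest_step_per_role_py := by
  intro steps _
  unfold Spec_latest_step_per_role_py
  rw [portA_char]
  unfold latest_step_per_role_py_alt
  rw [portB_gen steps steps PySem.Set.empty []]
  rw [flatMap_toList_eq_map steps _ ?_]
  · simp
  · intro k hk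
    have := mem_of_mem_newKeys (steps.map stepKey) PySem.Set.empty hk
    obtain ⟨s, hs, hks⟩ := List.mem_map.mp this
    exact ⟨s, hs, hks⟩
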